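-- pv_equiv track=rewrite | github.com/dilara2016/ASCII | a1.py | itemprice
-- ===== SOURCE A (Python) =====
-- def itemprice(barcode):
--     li = []
--     for i in barcode:
--         n = ord(i)
--         if n//10:
--             maxi = 0
--             while n>0:
--                 if n%10 > maxi:
--                     maxi = n%10
--                 n=n//10
--             li.append(maxi)
--         else:
--             li.append(n)
--     return sum(li)
-- ===== SOURCE B (Python) =====
-- def itemprice(barcode):
--     total = 0
--     for c in barcode:
--         s = str(ord(c))
--         for d in "9876543210":
--             if d in s:
--                 total += int(d)
--                 break
--     return total
-- ===== Notes on version B (the rewrite author's own statement) =====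
-- stated objective: alternative
-- what changed: Instead of peeling n's digits with mod/div and maintaining a running max (plus a single-digit branch), B searches candidate digits 9 down to 0 and adds the first one that occurs as a substring of str(ord(c)), accumulating a running total with no intermediate list.
import Mathlib
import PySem

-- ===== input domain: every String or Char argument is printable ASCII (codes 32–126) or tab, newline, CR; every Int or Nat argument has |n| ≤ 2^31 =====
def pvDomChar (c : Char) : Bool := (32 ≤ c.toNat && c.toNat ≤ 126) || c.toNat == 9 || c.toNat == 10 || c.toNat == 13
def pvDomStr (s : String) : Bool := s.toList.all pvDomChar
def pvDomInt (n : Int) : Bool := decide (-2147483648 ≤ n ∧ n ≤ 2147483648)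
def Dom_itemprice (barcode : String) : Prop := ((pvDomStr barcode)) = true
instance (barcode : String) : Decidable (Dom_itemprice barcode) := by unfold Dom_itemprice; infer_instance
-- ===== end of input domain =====

-- B replaces A's mod/div max-digit peel (and its single-digit branch) by a descending
-- first-match search over candidate digits "9".."0" in str(ord(c)), with a running total.

-- ===== PORT A =====
-- the `while n > 0` loop; fuel = n.toNat suffices since n strictly decreases
def itempriceWhile : Nat → Int → Int → Int
  | 0, _, maxi => maxi
  | fuel + 1, n, maxi =>
    if n > 0 then
      itempriceWhile fuel (PySem.Int.floordiv n 10)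
        (if PySem.Int.mod n 10 > maxi then PySem.Int.mod n 10 else maxi)
    else maxi

-- body of A's for-loop for one character's ordinal n (the appended value)
def itempriceCharA (n : Int) : Int :=
  if PySem.Int.floordiv n 10 ≠ 0 then itempriceWhile n.toNat n 0 else n

def itemprice (barcode : String) : Int :=
  (barcode.toList.foldl (fun li c => li ++ [itempriceCharA ((c.toNat : Int))]) []).sum

-- ===== PORT B =====
-- the inner `for d in "9876543210": if d in s: total += int(d); break` loop;
-- `d in s` for a single-char needle is exactly membership of d among s's chars;
-- falling off the loop without break adds nothing (returns 0 here)
def itempriceScan (s : List Char) : List Char → Int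
  | [] => 0
  | d :: rest => if s.contains d then ((d.toNat : Int) - 48) else itempriceScan s rest

def itemprice_alt (barcode : String) : Int :=
  barcode.toList.foldl
    (fun total c => total + itempriceScan (PySem.Int.toStr ((c.toNat : Int))).toList "9876543210".toList) 0

-- ===== PRECONDITION & SPEC =====
def Spec_itemprice (barcode : String) (out : Int) : Prop := out = itemprice_alt barcode
instance (barcode : String) (out : Int) : Decidable (Spec_itemprice barcode out) := by unfold Spec_itemprice; infer_instance

-- ===== CLAIM (what is proved, stated in full; the proofs are below) =====
def Claim_equal_itemprice : Prop := ∀ (barcode : String), Dom_itemprice barcode → Spec_itemprice barcode (itemprice barcode)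

-- ===== LEMMAS AND PROOFS =====
def itempriceCharB (n : Int) : Int :=
  itempriceScan (PySem.Int.toStr n).toList "9876543210".toList

lemma itemprice_char_eq : ∀ n : Nat, n < 127 → itempriceCharA (n : Int) = itempriceCharB (n : Int) := by
  decide

lemma itemprice_foldl_add (f : Char → Int) (l : List Char) (t : Int) :
    l.foldl (fun acc c => acc + f c) t = t + (l.map f).sum := by
  induction l generalizing t with
  | nil => simp
  | cons c l ih => simp only [List.foldl_cons, List.map_cons, List.sum_cons, ih]; ring

-- ===== VERDICT (by name: the statement is the Claim_ definition above) =====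
theorem itemprice_spec : Claim_equal_itemprice := by
  intro s hdom
  unfold Spec_itemprice itemprice itemprice_alt
  rw [PySem.List.foldl_append_singleton_eq_map, itemprice_foldl_add]
  simp only [zero_add]
  congr 1
  apply List.map_congr_left
  intro c hc
  have h := List.all_eq_true.mp hdom c hc
  have hlt : c.toNat < 127 := by simp [pvDomChar] at h; omega
  exact itemprice_char_eq c.toNat hlt
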